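-- pv_equiv track=rewrite | github.com/wyliemein/distributed_systems | src/node.py | even_distribution
-- ===== SOURCE A (Python) =====
-- def even_distribution(repl_factor, nodes):
--
-- 	nodes.sort()
-- 	num_shards = (len(nodes) // repl_factor)
-- 	replicas = (len(nodes) // num_shards)
-- 	overflow = (len(nodes) % num_shards)
--
-- 	shards = [[] for i in range(0, num_shards)]
-- 	shard_dict = {}
--
-- 	node_iter = 0
-- 	for shard in range(num_shards):
-- 		extra = (1 if shard < overflow else 0)
-- 		interval = replicas + extra
--
-- 		shards[shard] = nodes[node_iter:(node_iter+interval)]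
-- 		node_iter += interval
--
-- 		for node in shards[shard]:
-- 			shard_dict[node] = shard
--
-- 	return shard_dict
-- ===== SOURCE B (Python) =====
-- def even_distribution(repl_factor, nodes):
-- 	nodes.sort()
-- 	num_shards = len(nodes) // repl_factor
-- 	if num_shards <= 0:
-- 		return {}
-- 	replicas = len(nodes) // num_shards
-- 	overflow = len(nodes) % num_shards
--
-- 	shard_dict = {}
-- 	shard = 0
-- 	quota = replicas + (1 if overflow > 0 else 0)
-- 	for node in nodes:
-- 		if quota == 0:
-- 			shard += 1
-- 			quota = replicas + (1 if shard < overflow else 0)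
-- 		shard_dict[node] = shard
-- 		quota -= 1
-- 	return shard_dict
-- ===== Notes on version B (the rewrite author's own statement) =====
-- stated objective: simpler
-- what changed: A's nested loop over shards with a list-of-lists and slicing is replaced by a single linear pass over the sorted nodes that assigns shard indices with a running shard/quota counter and builds the dict directly (with an early empty-dict return when the computed shard count is not positive).
import Mathlib
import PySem

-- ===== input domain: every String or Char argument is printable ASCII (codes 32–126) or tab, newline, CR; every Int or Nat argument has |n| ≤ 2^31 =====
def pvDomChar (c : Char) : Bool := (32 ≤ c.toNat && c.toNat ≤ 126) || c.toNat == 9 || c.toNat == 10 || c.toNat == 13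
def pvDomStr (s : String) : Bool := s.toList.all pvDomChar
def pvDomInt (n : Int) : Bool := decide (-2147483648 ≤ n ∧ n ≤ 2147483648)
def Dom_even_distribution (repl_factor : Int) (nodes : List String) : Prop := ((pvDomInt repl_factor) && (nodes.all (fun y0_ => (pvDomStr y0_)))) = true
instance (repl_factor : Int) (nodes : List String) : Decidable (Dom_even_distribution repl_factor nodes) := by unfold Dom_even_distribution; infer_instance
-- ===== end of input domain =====

-- B replaces A's nested shard loop (list-of-lists + slicing) by a single pass over the
-- sorted nodes with a running shard/quota counter (objective: simpler). Both A and B sort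
-- `nodes` in place; the equivalence proved here is about the return value (the mutation is identical).

-- ===== PORT A =====
-- body of A's `for shard in range(num_shards)` loop; state = (shards, shard_dict, node_iter)
def pvStepA (s : List String) (replicas overflow : Int)
    (st : List (List String) × PySem.Dict String Int × Int) (shard : Int) :
    List (List String) × PySem.Dict String Int × Int :=
  let extra : Int := if shard < overflow then 1 else 0
  let interval := replicas + extra
  let shards' := PySem.List.pySetD st.1 shard (PySem.List.slice s (some st.2.2) (some (st.2.2 + interval)))
  -- shards[shard]: the index is in range on every state the loop reaches, so pyGetD is exact
  let blk := PySem.List.pyGetD shards' shard []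
  (shards', blk.foldl (fun d node => d.insert node shard) st.2.1, st.2.2 + interval)

def even_distribution (repl_factor : Int) (nodes : List String) : List (String × Int) :=
  let s := PySem.List.sorted nodes (fun x => x) false
  let num_shards := PySem.Int.floordiv (s.length : Int) repl_factor
  let replicas := PySem.Int.floordiv (s.length : Int) num_shards
  let overflow := PySem.Int.mod (s.length : Int) num_shards
  let shards0 := (PySem.List.pyRange 0 num_shards 1).map (fun _ => ([] : List String))
  ((PySem.List.pyRange 0 num_shards 1).foldl (pvStepA s replicas overflow)
    (shards0, PySem.Dict.empty, 0)).2.1.items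

-- ===== PORT B =====
-- body of B's `for node in nodes` loop; state = (shard_dict, shard, quota)
def pvStepB (replicas overflow : Int)
    (st : PySem.Dict String Int × Int × Int) (node : String) :
    PySem.Dict String Int × Int × Int :=
  let shard := if st.2.2 = 0 then st.2.1 + 1 else st.2.1
  let quota := if st.2.2 = 0 then replicas + (if shard < overflow then 1 else 0) else st.2.2
  (st.1.insert node shard, shard, quota - 1)

def even_distribution_alt (repl_factor : Int) (nodes : List String) : List (String × Int) :=
  let s := PySem.List.sorted nodes (fun x => x) false
  let num_shards := PySem.Int.floordiv (s.length : Int) repl_factor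
  if num_shards ≤ 0 then (PySem.Dict.empty : PySem.Dict String Int).items
  else
    let replicas := PySem.Int.floordiv (s.length : Int) num_shards
    let overflow := PySem.Int.mod (s.length : Int) num_shards
    (s.foldl (pvStepB replicas overflow)
      (PySem.Dict.empty, 0, replicas + (if (0 : Int) < overflow then 1 else 0))).1.items

-- ===== PRECONDITION & SPEC =====
-- Pre_ excludes exactly the inputs on which A raises ZeroDivisionError (computed shard count 0:
-- repl_factor = 0, an empty list, or 0 < len(nodes) < repl_factor); A returns on every input of Pre_.
def Pre_even_distribution (repl_factor : Int) (nodes : List String) : Prop :=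
  (1 ≤ repl_factor ∧ repl_factor ≤ (nodes.length : Int)) ∨
    (repl_factor ≤ -1 ∧ 1 ≤ (nodes.length : Int))
instance (repl_factor : Int) (nodes : List String) : Decidable (Pre_even_distribution repl_factor nodes) := by unfold Pre_even_distribution; infer_instance
def pvWitness_even_distribution : Int × List String := (2, ["b", "a", "c", "d", "e"])

def Spec_even_distribution (repl_factor : Int) (nodes : List String) (out : List (String × Int)) : Prop := out = even_distribution_alt repl_factor nodes
instance (repl_factor : Int) (nodes : List String) (out : List (String × Int)) : Decidable (Spec_even_distribution repl_factor nodes out) := by unfold Spec_even_distribution; infer_instance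

-- ===== CLAIM (what is proved, stated in full; the proofs are below) =====
def Claim_equal_even_distribution : Prop := ∀ (repl_factor : Int) (nodes : List String), Dom_even_distribution repl_factor nodes → Pre_even_distribution repl_factor nodes → Spec_even_distribution repl_factor nodes (even_distribution repl_factor nodes)

-- ===== LEMMAS AND PROOFS =====

-- the (dict, node_iter) part of A's loop, with the write-only `shards` list projected away
def pvDP (s : List String) (replicas overflow : Int)
    (st : PySem.Dict String Int × Int) (shard : Int) : PySem.Dict String Int × Int :=
  let interval := replicas + (if shard < overflow then 1 else 0)
  ((PySem.List.slice s (some st.2) (some (st.2 + interval))).foldl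
      (fun d node => d.insert node shard) st.1,
   st.2 + interval)

def pvIntv (q O j : Int) : Int := q + (if j < O then 1 else 0)
def pvPos (q O j : Int) : Int := j * q + min j O

-- A's loop only reads back the slice it just wrote; project the shards list away
lemma pvProjA (s : List String) (q O : Int) :
    ∀ (l : List Int) (sh : List (List String)) (d : PySem.Dict String Int) (p : Int),
      (∀ j ∈ l, 0 ≤ j ∧ j < (sh.length : Int)) →
      (l.foldl (pvStepA s q O) (sh, d, p)).2 = l.foldl (pvDP s q O) (d, p) := by
  intro l
  induction l with
  | nil => intro sh d p _; rfl
  | cons j l ih =>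
      intro sh d p hb
      have hj0 : 0 ≤ j := (hb j (by simp)).1
      have hjlt : j < (sh.length : Int) := (hb j (by simp)).2
      simp only [List.foldl_cons]
      have hset : pvStepA s q O (sh, d, p) j =
          (sh.set j.toNat (PySem.List.slice s (some p) (some (p + (q + (if j < O then 1 else 0))))),
           pvDP s q O (d, p) j) := by
        simp only [pvStepA, pvDP]
        rw [PySem.List.pySetD_of_nonneg _ _ hj0]
        rw [PySem.List.pyGetD_eq_getElem _ _ hj0 (by simpa [List.length_set] using hjlt)]
        simp [List.getElem_set_self]
      rw [hset]
      exact ih _ _ _ (by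
        intro i hi
        have := hb i (by simp [hi])
        simpa [List.length_set] using this)

-- B consumes a block of length = its current quota without changing the shard counter
lemma pvBlockB (q O : Int) :
    ∀ (blk rest : List String) (d : PySem.Dict String Int) (j : Int),
      ((blk ++ rest).foldl (pvStepB q O) (d, j, (blk.length : Int))) =
        rest.foldl (pvStepB q O) (blk.foldl (fun d node => d.insert node j) d, j, 0) := by
  intro blk
  induction blk with
  | nil => intro rest d j; rfl
  | cons x t ih =>
      intro rest d j
      simp only [List.cons_append, List.foldl_cons, List.length_cons]
      have hstep : pvStepB q O (d, j, ((t.length + 1 : Nat) : Int)) x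
          = (d.insert x j, j, (t.length : Int)) := by
        unfold pvStepB
        have hne : ((t.length + 1 : Nat) : Int) ≠ 0 := by push_cast; omega
        simp only [hne]
        refine Prod.ext rfl (Prod.ext rfl ?_)
        push_cast; ring
      rw [show ((t.length + 1 : Nat) : Int) = ((t.length : Nat) : Int) + 1 from by push_cast; ring] at hstep ⊢
      rw [hstep]
      exact ih rest (d.insert x j) j

lemma pvPos_succ (q O j : Int) :
    pvPos q O (j + 1) = pvPos q O j + pvIntv q O j := by
  unfold pvPos pvIntv
  rw [show (j + 1) * q = j * q + q from by ring]
  split_ifs with h <;> omega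

lemma pvPos_le (q O : Int) (hq : 1 ≤ q) {j j' : Int} (h : j ≤ j') :
    pvPos q O j ≤ pvPos q O j' := by
  have h1 : j * q ≤ j' * q := mul_le_mul_of_nonneg_right h (by omega)
  unfold pvPos; omega

lemma pvPos_lt (q O : Int) (hq : 1 ≤ q) {j j' : Int} (h : j < j') :
    pvPos q O j < pvPos q O j' := by
  have h1 : (j + 1) * q ≤ j' * q := mul_le_mul_of_nonneg_right (by omega) (by omega)
  have h2 : (j + 1) * q = j * q + q := by ring
  unfold pvPos; omega

-- the main loop correspondence: A's remaining shards vs B's remaining nodes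
lemma pvMain (s : List String) (q O m : Int) (hq : 1 ≤ q) (hO : 0 ≤ O) (hOm : O ≤ m)
    (hn : m * q + O = (s.length : Int)) :
    ∀ (k : Nat) (j : Int) (d : PySem.Dict String Int), 0 ≤ j → j + (k : Int) = m →
      ((PySem.List.pyRange j m 1).foldl (pvDP s q O) (d, pvPos q O j)).1 =
        ((s.drop (pvPos q O j).toNat).foldl (pvStepB q O) (d, j, pvIntv q O j)).1 := by
  intro k
  induction k with
  | zero =>
      intro j d hj0 hjm
      have hjm' : j = m := by omega
      subst hjm'
      have hpos : pvPos q O j = (s.length : Int) := by unfold pvPos; omega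
      rw [PySem.List.pyRange_one_eq_nil (le_refl j), hpos]
      simp
  | succ k ih =>
      intro j d hj0 hjm
      have hjm' : j < m := by omega
      have hq0 : (0 : Int) ≤ q := by omega
      have hP0 : 0 ≤ pvPos q O j := by
        have := mul_nonneg hj0 hq0
        unfold pvPos; omega
      have hI1 : 1 ≤ pvIntv q O j := by unfold pvIntv; split_ifs <;> omega
      have hsucc := pvPos_succ q O j
      have hposm : pvPos q O m = (s.length : Int) := by unfold pvPos; omega
      have hle : pvPos q O (j + 1) ≤ (s.length : Int) := by
        have := pvPos_le q O hq (show j + 1 ≤ m by omega)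
        omega
      rw [PySem.List.pyRange_one_cons hjm']
      simp only [List.foldl_cons]
      set P := pvPos q O j with hPdef
      set I := pvIntv q O j with hIdef
      set B := (s.drop P.toNat).take I.toNat with hBdef
      have hIeq : q + (if j < O then 1 else 0) = I := rfl
      have hdp : pvDP s q O (d, P) j =
          (B.foldl (fun d node => d.insert node j) d, pvPos q O (j + 1)) := by
        simp only [pvDP]
        rw [hIeq, PySem.List.slice_toNat _ hP0 (by omega),
            show (P + I).toNat - P.toNat = I.toNat from by omega, hsucc]
      have hsplit : s.drop P.toNat = B ++ s.drop (pvPos q O (j + 1)).toNat := by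
        rw [hBdef]
        have h1 : (s.drop P.toNat).drop I.toNat = s.drop (pvPos q O (j + 1)).toNat := by
          rw [List.drop_drop]
          congr 1
          omega
        rw [← h1, List.take_append_drop]
      have hBlen : (B.length : Int) = I := by
        rw [hBdef]
        simp only [List.length_take, List.length_drop]
        omega
      rw [hdp, hsplit, ← hBlen, pvBlockB q O B (s.drop (pvPos q O (j + 1)).toNat) d j]
      set D := B.foldl (fun d node => d.insert node j) d with hD
      rcases Nat.eq_zero_or_pos k with hk0 | hkpos
      · have hjm1 : j + 1 = m := by omega
        have hrest : s.drop (pvPos q O (j + 1)).toNat = [] := by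
          rw [hjm1, hposm]
          simp
        rw [hrest, hjm1, PySem.List.pyRange_one_eq_nil (le_refl m)]
        rfl
      · have hlt : pvPos q O (j + 1) < (s.length : Int) := by
          have := pvPos_lt q O hq (show j + 1 < m by omega)
          omega
        have hne : s.drop (pvPos q O (j + 1)).toNat ≠ [] := by
          intro hnil
          have := congrArg List.length hnil
          simp only [List.length_drop, List.length_nil] at this
          omega
        obtain ⟨x, r, hxr⟩ := List.exists_cons_of_ne_nil hne
        rw [hxr]
        simp only [List.foldl_cons]
        have hz : (q + if j + 1 < O then 1 else 0) ≠ 0 := by split_ifs <;> omega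
        have hstep : pvStepB q O (D, j, 0) x = pvStepB q O (D, j + 1, pvIntv q O (j + 1)) x := by
          simp [pvStepB, pvIntv, hz]
        rw [hstep, ← List.foldl_cons, ← hxr]
        exact ih (j + 1) D (by omega) (by omega)

-- ===== VERDICT (by name: the statement is the Claim_ definition above) =====
theorem even_distribution_spec : Claim_equal_even_distribution := by
  intro r nodes _ hpre
  unfold Spec_even_distribution even_distribution even_distribution_alt
  simp only []
  set s := PySem.List.sorted nodes (fun x => x) false with hs
  have hlen : s.length = nodes.length := by
    rw [hs]; exact PySem.List.length_sorted _ _ _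
  set n : Int := (s.length : Int) with hn
  set m := PySem.Int.floordiv n r with hm
  rcases hpre with ⟨hr1, hrn⟩ | ⟨hr, hn1⟩
  case inr =>
    -- negative repl_factor: the shard count is negative, A's range loop is empty, B's guard fires
    have hm_neg : m ≤ -1 := by
      have h := PySem.Int.floordiv_mul_add_mod n r
      have hb := PySem.Int.mod_neg_bounds (a := n) (b := r) (by omega)
      rw [← hm] at h
      by_contra hcon
      have hm0 : 0 ≤ m := by omega
      have : m * r ≤ 0 := mul_nonpos_of_nonneg_of_nonpos hm0 (by omega)
      omega
    rw [if_pos (by omega : m ≤ 0), PySem.List.pyRange_one_eq_nil (by omega : m ≤ (0 : Int))]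
    rfl
  case inl =>
  have hr0 : (0 : Int) < r := by omega
  have hm1 : 1 ≤ m := by
    rw [hm, PySem.Int.le_floordiv_iff_mul_le hr0]
    omega
  have hmn : m ≤ n := by
    rw [hm, PySem.Int.floordiv_eq_ediv_of_pos hr0]
    exact Int.ediv_le_self r (by omega)
  have hm0 : (0 : Int) < m := hm1
  set q := PySem.Int.floordiv n m with hq
  set O := PySem.Int.mod n m with hO
  have hq1 : 1 ≤ q := by
    rw [hq, PySem.Int.le_floordiv_iff_mul_le hm0]
    omega
  have hO0 : 0 ≤ O := PySem.Int.mod_nonneg n hm0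
  have hOm : O ≤ m := le_of_lt (PySem.Int.mod_lt n hm0)
  have hid : m * q + O = n := by
    have h := PySem.Int.floordiv_mul_add_mod n m
    rw [← hq, ← hO] at h
    rw [mul_comm]
    exact h
  have hb : ∀ j ∈ PySem.List.pyRange 0 m 1,
      0 ≤ j ∧ j < ((((PySem.List.pyRange 0 m 1).map
        (fun _ => ([] : List String))).length : Nat) : Int) := by
    intro j hj
    rw [PySem.List.mem_pyRange_one] at hj
    simp only [List.length_map, PySem.List.length_pyRange_one]
    omega
  rw [if_neg (by omega : ¬ m ≤ 0)]
  rw [pvProjA s q O (PySem.List.pyRange 0 m 1) _ PySem.Dict.empty 0 hb]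
  have h0 : pvPos q O 0 = 0 := by unfold pvPos; omega
  have hmain := pvMain s q O m hq1 hO0 hOm hid m.toNat 0 PySem.Dict.empty (le_refl 0)
    (by omega)
  rw [h0] at hmain
  simp only [Int.toNat_zero, List.drop_zero] at hmain
  have hi0 : pvIntv q O 0 = q + (if (0 : Int) < O then 1 else 0) := rfl
  rw [hi0] at hmain
  exact congrArg PySem.Dict.items hmain
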